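-- pv_equiv track=rewrite | github.com/jspaaks/aoc | 2023/05/test_p1.py | get_tables
-- ===== SOURCE A (Python) =====
-- def get_tables(lines):
--     nlines = len(lines)
--     block_bounds = [0] + [iline for iline, line in zip(range(nlines), lines) if line == ""] + [nlines]
--     tables = []
--     for i0, i1 in zip(block_bounds[1:-1], block_bounds[2:]):
--         block = [[int(elem) for elem in line.split()] for line in lines[i0 + 2:i1]]
--         tables.append(sorted(block, key=lambda x: x[1]))
--     return tables
-- ===== SOURCE B (Python) =====
-- def get_tables(lines):
--     tables = []
--     current = None
--     skip_header = False
--     for line in lines: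
--         if line == "":
--             if current is not None:
--                 tables.append(current)
--             current = []
--             skip_header = True
--         elif skip_header:
--             skip_header = False
--         elif current is not None:
--             current.append([int(e) for e in line.split()])
--     if current is not None:
--         tables.append(current)
--     return [sorted(block, key=lambda x: x[1]) for block in tables]
-- ===== Notes on version B (the rewrite author's own statement) =====
-- stated objective: alternative
-- what changed: Replaces A's precomputed blank-line index bounds plus slicing with a single streaming pass over the lines using a current-block/skip-header state machine, sorting each collected block at the end.
import Mathlib
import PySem

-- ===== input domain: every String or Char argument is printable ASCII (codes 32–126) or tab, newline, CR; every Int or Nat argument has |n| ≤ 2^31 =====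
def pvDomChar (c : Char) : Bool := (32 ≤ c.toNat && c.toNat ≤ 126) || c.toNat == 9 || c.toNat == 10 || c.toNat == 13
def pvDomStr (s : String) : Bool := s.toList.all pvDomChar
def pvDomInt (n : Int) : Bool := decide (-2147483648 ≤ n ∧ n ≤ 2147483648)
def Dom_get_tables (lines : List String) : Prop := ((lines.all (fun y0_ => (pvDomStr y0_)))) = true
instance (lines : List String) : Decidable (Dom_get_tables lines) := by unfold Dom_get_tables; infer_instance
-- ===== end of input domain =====

-- B replaces A's precomputed blank-line index bounds and slicing by a single streaming pass
-- with a current-block / skip-header state machine (objective: alternative decomposition, same cost).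

-- shared row/key helpers (both Pythons parse rows with int() over split() and sort by x[1])
def pvRow (line : String) : List Int :=
  (PySem.Str.split₀ line).map (fun e => (PySem.Int.ofStr? e).getD 0)

def pvKey (x : List Int) : Int := PySem.List.pyGetD x 1 0

-- ===== PORT A =====
def get_tables (lines : List String) : List (List (List Int)) :=
  let nlines : Int := lines.length
  let block_bounds : List Int :=
    [0] ++ (((PySem.List.pyRange 0 nlines 1).zip lines).filterMap
      (fun p => if p.2 = "" then some p.1 else none)) ++ [nlines]
  ((PySem.List.slice block_bounds (some 1) (some (-1))).zip
      (PySem.List.slice block_bounds (some 2) none)).foldl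
    (fun tables p =>
      let block := (PySem.List.slice lines (some (p.1 + 2)) (some p.2)).map pvRow
      tables ++ [PySem.List.sorted block pvKey]) []

-- ===== PORT B =====
def pvFlush (tables : List (List (List Int))) (current : Option (List (List Int))) :
    List (List (List Int)) :=
  match current with
  | some cur => tables ++ [cur]
  | none => tables

def pvStepB (st : List (List (List Int)) × Option (List (List Int)) × Bool) (line : String) :
    List (List (List Int)) × Option (List (List Int)) × Bool :=
  match st with
  | (tables, current, skip) =>
    if line = "" then (pvFlush tables current, some [], true)
    else if skip then (tables, current, false)
    else match current with
      | some cur => (tables, some (cur ++ [pvRow line]), skip)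
      | none => (tables, current, skip)

def get_tables_alt (lines : List String) : List (List (List Int)) :=
  let st := lines.foldl pvStepB ([], none, false)
  (pvFlush st.1 st.2.1).map (fun b => PySem.List.sorted b pvKey)

-- ===== PRECONDITION & SPEC =====
-- Pre_ excludes exactly the inputs on which the Python A raises: a data row (a non-blank line,
-- not immediately after a blank, with at least one blank line before it) whose tokens are not all
-- int()-parseable (ValueError) or which has fewer than two tokens (IndexError from the key x[1]).
def Pre_get_tables (lines : List String) : Prop :=
  ∀ i ∈ List.range lines.length,
    (lines.getD i "" ≠ "" ∧ 1 ≤ i ∧ lines.getD (i - 1) "" ≠ "" ∧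
      ∃ j ∈ List.range i, lines.getD j "" = "") →
    (2 ≤ (PySem.Str.split₀ (lines.getD i "")).length ∧
      ∀ t ∈ PySem.Str.split₀ (lines.getD i ""), (PySem.Int.ofStr? t).isSome)

instance (lines : List String) : Decidable (Pre_get_tables lines) := by
  unfold Pre_get_tables; infer_instance

def pvWitness_get_tables : List String :=
  ["ignored:", "", "header map:", "10 2 3", "-4 1 0", "", "header2:"]

def Spec_get_tables (lines : List String) (out : List (List (List Int))) : Prop := out = get_tables_alt lines
instance (lines : List String) (out : List (List (List Int))) : Decidable (Spec_get_tables lines out) := by unfold Spec_get_tables; infer_instance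

-- ===== CLAIM (what is proved, stated in full; the proofs are below) =====
def Claim_equal_get_tables : Prop := ∀ (lines : List String), Dom_get_tables lines → Pre_get_tables lines → Spec_get_tables lines (get_tables lines)

-- ===== LEMMAS AND PROOFS =====

-- 0-based indices of the blank lines
def blanksN : List String → List Nat
  | [] => []
  | l :: t => if l = "" then 0 :: (blanksN t).map (· + 1) else (blanksN t).map (· + 1)

-- reference block splitter: called on the suffix of the input starting at its first blank line
def blocksGo : List String → List (List String)
  | [] => []
  | _ :: rest => ((rest.takeWhile (· ≠ "")).drop 1) :: blocksGo (rest.dropWhile (· ≠ ""))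
  termination_by l => l.length
  decreasing_by
    simp only [List.length_cons]
    exact Nat.lt_succ_of_le (List.length_dropWhile_le _ _)

theorem blocksGo_cons (x : String) (rest : List String) :
    blocksGo (x :: rest)
      = ((rest.takeWhile (· ≠ "")).drop 1) :: blocksGo (rest.dropWhile (· ≠ "")) := by
  rw [blocksGo]

theorem blocksGo_nil : blocksGo [] = [] := by rw [blocksGo]

theorem blanks_zip (lines : List String) : ∀ (a : Int),
    ((PySem.List.pyRange a (a + lines.length) 1).zip lines).filterMap
        (fun p => if p.2 = "" then some p.1 else none)
      = (blanksN lines).map (fun k : Nat => a + (k : Int)) := by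
  induction lines with
  | nil => intro a; simp [blanksN]
  | cons l t ih =>
    intro a
    have h1 : (a : Int) < a + (l :: t).length := by simp only [List.length_cons]; push_cast; omega
    rw [PySem.List.pyRange_one_cons h1]
    have h2 : a + ((l :: t).length : Int) = (a + 1) + (t.length : Int) := by
      simp only [List.length_cons]; push_cast; ring
    rw [h2, List.zip_cons_cons, List.filterMap_cons]
    have hmm : ∀ (bl : List Nat), bl.map (fun k : Nat => (a + 1) + (k : Int))
        = (bl.map (fun k : Nat => k + 1)).map (fun k : Nat => a + (k : Int)) := by
      intro bl; rw [List.map_map]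
      exact List.map_congr_left (fun k _ => by simp only [Function.comp_apply]; push_cast; ring)
    by_cases hl : l = ""
    · rw [if_pos hl, ih (a + 1), hmm]
      simp only [blanksN, if_pos hl, List.map_cons]
      norm_num
    · rw [if_neg hl, ih (a + 1), hmm]
      simp only [blanksN, if_neg hl]

theorem takeWhile_of_blanksN_nil (t : List String) (h : blanksN t = []) :
    t.takeWhile (· ≠ "") = t ∧ t.dropWhile (· ≠ "") = [] := by
  induction t with
  | nil => simp
  | cons l r ih =>
    by_cases hl : l = ""
    · simp [blanksN, hl] at h
    · simp only [blanksN, if_neg hl, List.map_eq_nil_iff] at h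
      obtain ⟨h1, h2⟩ := ih h
      rw [List.takeWhile_cons, List.dropWhile_cons]
      simp only [hl, ne_eq, not_false_iff, decide_true, if_true, decide_not]
      exact ⟨by rw [show List.takeWhile (fun x => !decide (x = "")) r = r from by simpa using h1],
        by simpa using h2⟩

theorem takeWhile_of_blanksN_cons (t : List String) (j : Nat) (bl : List Nat)
    (h : blanksN t = j :: bl) : t.takeWhile (· ≠ "") = t.take j := by
  induction t generalizing j bl with
  | nil => simp [blanksN] at h
  | cons l r ih =>
    by_cases hl : l = ""
    · simp only [blanksN, if_pos hl, List.cons.injEq] at h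
      obtain ⟨h1, _⟩ := h
      rw [List.takeWhile_cons]
      simp [hl, ← h1]
    · simp only [blanksN, if_neg hl] at h
      cases hb : blanksN r with
      | nil => rw [hb] at h; simp at h
      | cons j2 bl2 =>
        rw [hb] at h
        simp only [List.map_cons, List.cons.injEq] at h
        obtain ⟨h1, _⟩ := h
        rw [List.takeWhile_cons]
        simp only [hl, ne_eq, not_false_iff, decide_true, if_true, ← h1, List.take_succ_cons]
        simpa using ih j2 bl2 hb

theorem slice_one_neg_one (bl : List Int) (n : Int) :
    PySem.List.slice (0 :: bl ++ [n]) (some 1) (some (-1)) = bl := by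
  simp only [PySem.List.slice, PySem.List.clampIdx, List.length_cons, List.length_append]
  norm_num
  rw [if_neg (by omega : ¬ ((bl.length : Int) + 1 < 0))]
  simpa using List.take_left (l₁ := bl) (l₂ := [n])

theorem slice_two_none (bl : List Int) (n : Int) :
    PySem.List.slice (0 :: bl ++ [n]) (some 2) none = (bl ++ [n]).drop 1 := by
  simp [PySem.List.slice, PySem.List.clampIdx]

theorem slice_shift (l : String) (t : List String) (a b : Nat) :
    PySem.List.slice (l :: t) (some (((a + 1 : Nat) : Int) + 2)) (some ((b + 1 : Nat) : Int))
      = PySem.List.slice t (some ((a : Int) + 2)) (some (b : Int)) := by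
  have e1 : ((a + 1 : Nat) : Int) + 2 = ((a + 3 : Nat) : Int) := by push_cast; ring
  have e2 : ((a : Nat) : Int) + 2 = ((a + 2 : Nat) : Int) := by push_cast; ring
  rw [e1, e2, PySem.List.slice_natCast, PySem.List.slice_natCast]
  have e3 : (l :: t).drop (a + 3) = t.drop (a + 2) := by
    simpa using List.drop_succ_cons (n := a + 2) (a := l) (l := t)
  rw [e3]
  congr 1
  omega

theorem zip_pairs_shift (bl : List Nat) (n : Nat) :
    (bl.map (fun k => k + 1)).zip (((bl.map (fun k => k + 1)) ++ [n + 1]).drop 1)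
      = (bl.zip ((bl ++ [n]).drop 1)).map (fun p => (p.1 + 1, p.2 + 1)) := by
  have h1 : (bl.map (fun k => k + 1)) ++ [n + 1] = (bl ++ [n]).map (fun k => k + 1) := by simp
  rw [h1, ← List.map_drop, List.zip_map]
  rfl

theorem A_blocks (lines : List String) :
    ((blanksN lines).zip (((blanksN lines) ++ [lines.length]).drop 1)).map
        (fun p => PySem.List.sorted
          ((PySem.List.slice lines (some ((p.1 : Int) + 2)) (some (p.2 : Int))).map pvRow) pvKey)
      = (blocksGo (lines.dropWhile (· ≠ ""))).map
          (fun b => PySem.List.sorted (b.map pvRow) pvKey) := by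
  induction lines with
  | nil => simp [blanksN, blocksGo]
  | cons l t ih =>
    by_cases hl : l = ""
    · subst hl
      rw [show blanksN ("" :: t) = 0 :: (blanksN t).map (· + 1) from by simp [blanksN]]
      rw [show ("" :: t).dropWhile (· ≠ "") = "" :: t from by simp [List.dropWhile_cons]]
      rw [blocksGo_cons]
      cases hb : blanksN t with
      | nil =>
        obtain ⟨htw, hdw⟩ := takeWhile_of_blanksN_nil t hb
        rw [htw, hdw, blocksGo_nil]
        have hslice : PySem.List.slice ("" :: t) (some (2 : Int)) (some ((t.length : Int) + 1))
            = t.drop 1 := by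
          rw [show (2 : Int) = ((2 : Nat) : Int) from rfl,
            show ((t.length : Int) + 1) = ((t.length + 1 : Nat) : Int) from by push_cast; ring,
            PySem.List.slice_natCast,
            show (("" :: t).drop 2) = t.drop 1 from rfl]
          exact List.take_of_length_le (by simp)
        simp [hslice]
      | cons j bl2 =>
        have htw := takeWhile_of_blanksN_cons t j bl2 hb
        rw [htw]
        have hs2 : PySem.List.slice ("" :: t) (some (2 : Int)) (some ((j : Int) + 1))
            = (t.drop 1).take (j - 1) := by
          rw [show (2 : Int) = ((2 : Nat) : Int) from rfl,
            show ((j : Int) + 1) = ((j + 1 : Nat) : Int) from by push_cast; ring,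
            PySem.List.slice_natCast,
            show (("" :: t).drop 2) = t.drop 1 from rfl,
            show j + 1 - 2 = j - 1 from by omega]
        have hre : (0 :: List.map (fun x => x + 1) (j :: bl2)).zip
              (List.drop 1 (0 :: List.map (fun x => x + 1) (j :: bl2) ++ [("" :: t).length]))
            = ((0 : Nat), j + 1) :: (((j :: bl2).map (fun k => k + 1)).zip
                ((((j :: bl2).map (fun k => k + 1)) ++ [t.length + 1]).drop 1)) := by
          simp
        rw [hre, List.map_cons, zip_pairs_shift, List.map_map, ← hb]
        congr 1
        · simp [hs2, List.drop_take]
        · refine Eq.trans (List.map_congr_left ?_) ih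
          intro p _
          simp only [Function.comp_apply]
          rw [slice_shift "" t p.1 p.2]
    · rw [show blanksN (l :: t) = (blanksN t).map (· + 1) from by simp [blanksN, hl]]
      rw [show (l :: t).dropWhile (· ≠ "") = t.dropWhile (· ≠ "") from by
        simp [List.dropWhile_cons, hl]]
      rw [show ((l :: t).length) = t.length + 1 from rfl, zip_pairs_shift, List.map_map]
      refine Eq.trans (List.map_congr_left ?_) ih
      intro p _
      simp only [Function.comp_apply]
      rw [slice_shift l t p.1 p.2]

theorem get_tables_eq (lines : List String) :
    get_tables lines
      = (blocksGo (lines.dropWhile (· ≠ ""))).map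
          (fun b => PySem.List.sorted (b.map pvRow) pvKey) := by
  simp only [get_tables]
  rw [show ((lines.length : Int)) = 0 + (lines.length : Int) from by ring]
  rw [blanks_zip lines 0]
  simp only [zero_add]
  rw [List.singleton_append]
  rw [slice_one_neg_one ((blanksN lines).map (fun k : Nat => (k : Int))) (lines.length : Int),
    slice_two_none ((blanksN lines).map (fun k : Nat => (k : Int))) (lines.length : Int)]
  rw [PySem.List.foldl_append_singleton_eq_map]
  rw [show ((blanksN lines).map (fun k : Nat => (k : Int)) ++ [(lines.length : Int)])
      = (blanksN lines ++ [lines.length]).map (fun k : Nat => (k : Int)) from by simp]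
  rw [← List.map_drop, List.zip_map, List.map_map]
  simp only [List.nil_append]
  refine Eq.trans ?_ (A_blocks lines)
  exact List.map_congr_left (fun p _ => by obtain ⟨x, y⟩ := p; rfl)

theorem foldB_none (l : List String) (h : ∀ x ∈ l, x ≠ "") (ts : List (List (List Int))) :
    l.foldl pvStepB (ts, none, false) = (ts, none, false) := by
  induction l with
  | nil => rfl
  | cons x r ih =>
    have hx : x ≠ "" := h x (by simp)
    rw [List.foldl_cons]
    have hstep : pvStepB (ts, none, false) x = (ts, none, false) := by
      simp [pvStepB, hx]
    rw [hstep]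
    exact ih (fun y hy => h y (by simp [hy]))

theorem foldB_main : ∀ (n : Nat) (r : List String), r.length ≤ n →
    ∀ (ts : List (List (List Int))) (cur : List (List Int)),
    (pvFlush (r.foldl pvStepB (ts, some cur, true)).1 (r.foldl pvStepB (ts, some cur, true)).2.1
      = ts ++ (cur ++ ((r.takeWhile (· ≠ "")).drop 1).map pvRow)
          :: (blocksGo (r.dropWhile (· ≠ ""))).map (List.map pvRow))
    ∧ (pvFlush (r.foldl pvStepB (ts, some cur, false)).1 (r.foldl pvStepB (ts, some cur, false)).2.1
      = ts ++ (cur ++ (r.takeWhile (· ≠ "")).map pvRow)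
          :: (blocksGo (r.dropWhile (· ≠ ""))).map (List.map pvRow)) := by
  intro n
  induction n with
  | zero =>
    intro r hr ts cur
    have : r = [] := List.length_eq_zero_iff.mp (Nat.le_zero.mp hr)
    subst this
    constructor <;> simp [pvFlush, blocksGo]
  | succ n ih =>
    intro r hr ts cur
    cases r with
    | nil => constructor <;> simp [pvFlush, blocksGo]
    | cons x r2 =>
      have hr2 : r2.length ≤ n := by simpa using hr
      by_cases hx : x = ""
      · subst hx
        have hstep1 : pvStepB (ts, some cur, true) "" = (ts ++ [cur], some [], true) := by
          simp [pvStepB, pvFlush]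
        have hstep2 : pvStepB (ts, some cur, false) "" = (ts ++ [cur], some [], true) := by
          simp [pvStepB, pvFlush]
        constructor
        · rw [List.foldl_cons, hstep1, (ih r2 hr2 (ts ++ [cur]) []).1]
          simp [List.takeWhile_cons, List.dropWhile_cons, blocksGo_cons]
        · rw [List.foldl_cons, hstep2, (ih r2 hr2 (ts ++ [cur]) []).1]
          simp [List.takeWhile_cons, List.dropWhile_cons, blocksGo_cons]
      · have hstep1 : pvStepB (ts, some cur, true) x = (ts, some cur, false) := by
          simp [pvStepB, hx]
        have hstep2 : pvStepB (ts, some cur, false) x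
            = (ts, some (cur ++ [pvRow x]), false) := by
          simp [pvStepB, hx]
        constructor
        · rw [List.foldl_cons, hstep1, (ih r2 hr2 ts cur).2]
          simp [List.takeWhile_cons, List.dropWhile_cons, hx]
        · rw [List.foldl_cons, hstep2, (ih r2 hr2 ts (cur ++ [pvRow x])).2]
          simp [List.takeWhile_cons, List.dropWhile_cons, hx]

theorem dropWhile_head_blank (lines : List String) (d : String) (r : List String)
    (h : lines.dropWhile (· ≠ "") = d :: r) : d = "" := by
  induction lines with
  | nil => simp at h
  | cons l t ih =>
    rw [List.dropWhile_cons] at h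
    by_cases hl : l = ""
    · simp [hl] at h
      exact h.1
    · simp only [hl, ne_eq, not_false_iff, decide_true, if_true] at h
      exact ih (by simpa using h)

theorem get_tables_alt_eq (lines : List String) :
    get_tables_alt lines
      = (blocksGo (lines.dropWhile (· ≠ ""))).map
          (fun b => PySem.List.sorted (b.map pvRow) pvKey) := by
  simp only [get_tables_alt]
  conv_lhs => rw [← List.takeWhile_append_dropWhile (p := fun x => decide (x ≠ "")) (l := lines)]
  rw [List.foldl_append,
    foldB_none _ (fun x hx => by simpa using List.mem_takeWhile_imp hx) []]
  cases h : lines.dropWhile (· ≠ "") with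
  | nil => simp [pvFlush, blocksGo]
  | cons d r2 =>
    have hd := dropWhile_head_blank lines d r2 h
    subst hd
    rw [List.foldl_cons]
    have hstep : pvStepB ([], none, false) "" = ([], some [], true) := by
      simp [pvStepB, pvFlush]
    rw [hstep, (foldB_main r2.length r2 le_rfl [] []).1, blocksGo_cons]
    simp [List.map_map]

-- ===== VERDICT (by name: the statement is the Claim_ definition above) =====
theorem get_tables_spec : Claim_equal_get_tables := by
  intro lines _ _
  unfold Spec_get_tables
  rw [get_tables_eq, get_tables_alt_eq]
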